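-- pv_equiv track=rewrite | github.com/HYLZ-2019/RAW_event_converter | evt3_reader.py | parse_format_string
-- ===== SOURCE A (Python) =====
-- from typing import Dict, Tuple, List, Optional
--
-- def parse_format_string(format_str: str) -> Tuple[str, int, int]:
-- 	"""
-- 	解析format字符串
--
-- 	Args:
-- 		format_str: 如 "EVT3;height=720;width=1280"
--
-- 	Returns:
-- 		(encoding_format, height, width)
-- 	"""
-- 	parts = format_str.split(';')
-- 	encoding_format = parts[0]
--
-- 	height = width = 0
-- 	for part in parts[1:]:
-- 		if '=' in part:
-- 			key, value = part.split('=')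
-- 			if key == 'height':
-- 				height = int(value)
-- 			elif key == 'width':
-- 				width = int(value)
--
-- 	return encoding_format, height, width
-- ===== SOURCE B (Python) =====
-- def parse_format_string(format_str):
-- 	parts = format_str.split(';')
--
-- 	def last_value(key, fields):
-- 		# scan from the right: the first match seen is the one A's last assignment kept
-- 		for part in reversed(fields):
-- 			if '=' in part:
-- 				k, v = part.split('=')
-- 				if k == key:
-- 					return int(v)
-- 		return 0
--
-- 	rest = parts[1:]
-- 	return parts[0], last_value('height', rest), last_value('width', rest)
-- ===== Notes on version B (the rewrite author's own statement) =====
-- stated objective: alternative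
-- what changed: A makes one forward pass maintaining two accumulators with per-key if/elif branches; B makes a separate backward scan per key with early return (first match from the right wins), converting to int only the surviving value.
import Mathlib
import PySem

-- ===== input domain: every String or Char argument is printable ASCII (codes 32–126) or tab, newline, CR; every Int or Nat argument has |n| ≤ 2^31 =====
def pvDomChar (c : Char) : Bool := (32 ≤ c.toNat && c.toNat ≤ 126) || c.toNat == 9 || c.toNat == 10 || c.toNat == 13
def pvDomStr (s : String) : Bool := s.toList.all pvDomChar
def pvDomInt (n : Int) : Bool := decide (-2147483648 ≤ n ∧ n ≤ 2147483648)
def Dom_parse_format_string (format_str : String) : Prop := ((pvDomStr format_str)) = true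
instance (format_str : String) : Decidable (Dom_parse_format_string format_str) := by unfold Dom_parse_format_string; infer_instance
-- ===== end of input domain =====

-- B replaces A's single forward pass with two accumulators by one backward early-exit scan per key (alternative decomposition; same cost).

-- ===== PORT A =====
-- loop body of A's for-loop (state = (height, width)); the '_' arm is
-- unreachable under Pre_ (Python raises ValueError on a part with more than one '=')
def pvAStep (s : Int × Int) (p : String) : Int × Int :=
  if PySem.Str.isIn "=" p then
    match (PySem.Str.split? p "=").getD [] with
    | [k, v] =>
        if k = "height" then ((PySem.Int.ofStr? v).getD 0, s.2)
        else if k = "width" then (s.1, (PySem.Int.ofStr? v).getD 0)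
        else s
    | _ => s
  else s

def parse_format_string (format_str : String) : String × Int × Int :=
  let parts := (PySem.Str.split? format_str ";").getD []
  let encoding_format := parts.getD 0 ""
  let hw := (parts.drop 1).foldl pvAStep (0, 0)
  (encoding_format, hw.1, hw.2)

-- ===== PORT B =====
-- B's `last_value(key, fields)` applied to the reversed field list: a for-loop with
-- early return becomes structural recursion; the '_' arm is unreachable under Pre_
def pvLastValue (key : String) : List String → Int
  | [] => 0
  | p :: rest =>
      if PySem.Str.isIn "=" p then
        match (PySem.Str.split? p "=").getD [] with
        | [k, v] => if k = key then (PySem.Int.ofStr? v).getD 0 else pvLastValue key rest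
        | _ => pvLastValue key rest
      else pvLastValue key rest

def parse_format_string_alt (format_str : String) : String × Int × Int :=
  let parts := (PySem.Str.split? format_str ";").getD []
  let rest := parts.drop 1
  (parts.getD 0 "", pvLastValue "height" rest.reverse, pvLastValue "width" rest.reverse)

-- ===== PRECONDITION & SPEC =====
-- Pre_ excludes exactly the inputs on which Python A raises: a ';'-part (after the first)
-- containing more than one '=' (ValueError on tuple unpack), or a height/width part whose
-- value is not a valid int literal (ValueError in int()).
def Pre_parse_format_string (format_str : String) : Prop :=
  ∀ p ∈ ((PySem.Str.split? format_str ";").getD []).drop 1,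
    PySem.Str.isIn "=" p = true →
      ((PySem.Str.split? p "=").getD []).length = 2 ∧
      ((((PySem.Str.split? p "=").getD []).getD 0 "" = "height" ∨ ((PySem.Str.split? p "=").getD []).getD 0 "" = "width") →
        (PySem.Int.ofStr? (((PySem.Str.split? p "=").getD []).getD 1 "")).isSome = true)
instance (format_str : String) : Decidable (Pre_parse_format_string format_str) := by unfold Pre_parse_format_string; infer_instance

def pvWitness_parse_format_string : String := "EVT3;height=720;width=1280"

def Spec_parse_format_string (format_str : String) (out : String × Int × Int) : Prop := out = parse_format_string_alt format_str
instance (format_str : String) (out : String × Int × Int) : Decidable (Spec_parse_format_string format_str out) := by unfold Spec_parse_format_string; infer_instance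

-- ===== CLAIM (what is proved, stated in full; the proofs are below) =====
def Claim_equal_parse_format_string : Prop := ∀ (format_str : String), Dom_parse_format_string format_str → Pre_parse_format_string format_str → Spec_parse_format_string format_str (parse_format_string format_str)

-- ===== LEMMAS AND PROOFS =====

-- what one part contributes to a key, given the value accumulated so far
def pvMatch (key : String) (p : String) (d : Int) : Int :=
  if PySem.Str.isIn "=" p then
    match (PySem.Str.split? p "=").getD [] with
    | [k, v] => if k = key then (PySem.Int.ofStr? v).getD 0 else d
    | _ => d
  else d

-- pvLastValue with an explicit default for the no-match case
def pvLastValueD (key : String) (d : Int) : List String → Int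
  | [] => d
  | p :: rest =>
      if PySem.Str.isIn "=" p then
        match (PySem.Str.split? p "=").getD [] with
        | [k, v] => if k = key then (PySem.Int.ofStr? v).getD 0 else pvLastValueD key d rest
        | _ => pvLastValueD key d rest
      else pvLastValueD key d rest

lemma pvLastValue_eq_D (key : String) (l : List String) :
    pvLastValue key l = pvLastValueD key 0 l := by
  induction l with
  | nil => rfl
  | cons p rest ih =>
      unfold pvLastValue pvLastValueD
      split_ifs with h
      · rcases hs : (PySem.Str.split? p "=").getD [] with _ | ⟨k, _ | ⟨v, _ | _⟩⟩ <;>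
          simp only [ih]
      · exact ih

lemma pvLastValueD_append (key : String) (d : Int) (l : List String) (p : String) :
    pvLastValueD key d (l ++ [p]) = pvLastValueD key (pvMatch key p d) l := by
  induction l with
  | nil =>
      simp only [List.nil_append, pvLastValueD, pvMatch]
  | cons q rest ih =>
      simp only [List.cons_append, pvLastValueD]
      split_ifs with h
      · rcases hs : (PySem.Str.split? q "=").getD [] with _ | ⟨k, _ | ⟨v, _ | _⟩⟩ <;>
          simp only [ih]
      · exact ih

lemma pvAStep_fst (s : Int × Int) (p : String) :
    (pvAStep s p).1 = pvMatch "height" p s.1 := by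
  unfold pvAStep pvMatch
  split_ifs with h
  · rcases hs : (PySem.Str.split? p "=").getD [] with _ | ⟨k, _ | ⟨v, _ | _⟩⟩ <;> simp only
    by_cases hk : k = "height"
    · simp [hk]
    · by_cases hk2 : k = "width" <;> simp [hk, hk2]
  · rfl

lemma pvAStep_snd (s : Int × Int) (p : String) :
    (pvAStep s p).2 = pvMatch "width" p s.2 := by
  unfold pvAStep pvMatch
  split_ifs with h
  · rcases hs : (PySem.Str.split? p "=").getD [] with _ | ⟨k, _ | ⟨v, _ | _⟩⟩ <;> simp only
    by_cases hk : k = "height"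
    · simp [hk]
    · by_cases hk2 : k = "width" <;> simp [hk, hk2]
  · rfl

lemma pv_fold (ps : List String) (s : Int × Int) :
    ps.foldl pvAStep s
      = (pvLastValueD "height" s.1 ps.reverse, pvLastValueD "width" s.2 ps.reverse) := by
  induction ps generalizing s with
  | nil => rfl
  | cons p ps ih =>
      simp only [List.foldl, List.reverse_cons]
      rw [ih, pvLastValueD_append, pvLastValueD_append, pvAStep_fst, pvAStep_snd]

-- ===== VERDICT (by name: the statement is the Claim_ definition above) =====
theorem parse_format_string_spec : Claim_equal_parse_format_string := by
  intro fs _ _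
  unfold Spec_parse_format_string parse_format_string parse_format_string_alt
  simp only [pv_fold, pvLastValue_eq_D]
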